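-- pv_equiv track=rewrite | github.com/AtmosferaUSM/ppti_class_video | fix_latex_27.py | balance_braces_globally
-- ===== SOURCE A (Python) =====
-- def balance_braces_globally(text):
--     stack = []
--     corrected_text = []
--     corrections = []
--     for i, char in enumerate(text):
--         corrected_text.append(char)
--         if char == '{':
--             stack.append(i)
--         elif char == '}':
--             if stack:
--                 stack.pop()
--             else:
--                 corrected_text.pop()
--                 corrections.append(f"Unmatched closing brace at position {i}")
--     if stack:
--         for idx in stack:
--             corrected_text.append('}')
--             corrections.append(f"Missing closing brace for opening at position {idx}")
--     return ''.join(corrected_text), corrections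
-- ===== SOURCE B (Python) =====
-- def balance_braces_globally(text):
--     stack = []
--     drop = set()
--     corrections = []
--     for i, char in enumerate(text):
--         if char == '{':
--             stack.append(i)
--         elif char == '}':
--             if stack:
--                 stack.pop()
--             else:
--                 drop.add(i)
--                 corrections.append(f"Unmatched closing brace at position {i}")
--     corrections.extend(f"Missing closing brace for opening at position {idx}" for idx in stack)
--     corrected = ''.join(c for i, c in enumerate(text) if i not in drop) + '}' * len(stack)
--     return corrected, corrections
-- ===== Notes on version B (the rewrite author's own statement) =====
-- stated objective: alternative
-- what changed: Instead of building the corrected text mutably during the scan (append then pop each unmatched closer), B's scan only records the set of indices to drop and the leftover stack, and the output is assembled afterwards by one filtering join plus a repeated closing brace suffix.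
import Mathlib
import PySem

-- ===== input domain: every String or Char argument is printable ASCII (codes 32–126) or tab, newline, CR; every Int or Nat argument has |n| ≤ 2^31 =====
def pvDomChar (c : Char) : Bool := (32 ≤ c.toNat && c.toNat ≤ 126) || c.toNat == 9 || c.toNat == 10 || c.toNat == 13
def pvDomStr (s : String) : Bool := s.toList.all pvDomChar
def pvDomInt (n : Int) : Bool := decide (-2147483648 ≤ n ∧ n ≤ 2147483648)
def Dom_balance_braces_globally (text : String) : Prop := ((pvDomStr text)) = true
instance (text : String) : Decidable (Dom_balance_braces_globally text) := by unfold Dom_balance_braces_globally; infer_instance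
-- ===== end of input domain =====

-- B records the indices of unmatched closing braces in a set during the scan and builds the
-- corrected string afterwards by one filtering join plus a brace repeat, instead of A's
-- mutable append/pop construction during the scan (objective: alternative decomposition).


-- ===== PORT A =====
-- one step of A's scan: append char, then adjust stack / pop the char on an unmatched '}'
def bbgStepA (st : List Int × List Char × List String) (p : Int × Char) :
    List Int × List Char × List String :=
  let ctext := st.2.1 ++ [p.2]
  if p.2 = '{' then (st.1 ++ [p.1], ctext, st.2.2)
  else if p.2 = '}' then
    if st.1 ≠ [] then (st.1.dropLast, ctext, st.2.2)
    else (st.1, ctext.dropLast,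
          st.2.2 ++ ["Unmatched closing brace at position " ++ PySem.Int.toStr p.1])
  else (st.1, ctext, st.2.2)

def balance_braces_globally (text : String) : String × List String :=
  let r := (PySem.List.enumerate text.toList 0).foldl bbgStepA ([], [], [])
  let q :=
    if r.1 ≠ [] then
      r.1.foldl (fun (q : List Char × List String) idx =>
        (q.1 ++ ['}'],
         q.2 ++ ["Missing closing brace for opening at position " ++ PySem.Int.toStr idx]))
        (r.2.1, r.2.2)
    else (r.2.1, r.2.2)
  (String.mk q.1, q.2)

-- ===== PORT B =====
-- one step of B's scan: adjust the stack, or record an unmatched '}' index in the drop set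
def bbgStepB (st : List Int × PySem.Set Int × List String) (p : Int × Char) :
    List Int × PySem.Set Int × List String :=
  if p.2 = '{' then (st.1 ++ [p.1], st.2.1, st.2.2)
  else if p.2 = '}' then
    if st.1 ≠ [] then (st.1.dropLast, st.2.1, st.2.2)
    else (st.1, st.2.1.add p.1,
          st.2.2 ++ ["Unmatched closing brace at position " ++ PySem.Int.toStr p.1])
  else (st.1, st.2.1, st.2.2)

def balance_braces_globally_alt (text : String) : String × List String :=
  let r := (PySem.List.enumerate text.toList 0).foldl bbgStepB ([], PySem.Set.empty, [])
  let corrections := r.2.2 ++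
    r.1.map (fun idx => "Missing closing brace for opening at position " ++ PySem.Int.toStr idx)
  let corrected := String.mk
    (((PySem.List.enumerate text.toList 0).filter
        (fun p => ¬ PySem.Set.contains r.2.1 p.1)).map (·.2) ++
     PySem.List.pyRepeat ['}'] (r.1.length : Int))
  (corrected, corrections)

-- ===== PRECONDITION & SPEC =====
def Spec_balance_braces_globally (text : String) (out : String × List String) : Prop := out = balance_braces_globally_alt text
instance (text : String) (out : String × List String) : Decidable (Spec_balance_braces_globally text out) := by unfold Spec_balance_braces_globally; infer_instance

-- ===== CLAIM (what is proved, stated in full; the proofs are below) =====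
def Claim_equal_balance_braces_globally : Prop := ∀ (text : String), Dom_balance_braces_globally text → Spec_balance_braces_globally text (balance_braces_globally text)

-- ===== LEMMAS AND PROOFS =====

-- every index in the drop set after running B's scan was either there already or is an index of the list
lemma bbg_drop_sub : ∀ (l : List (Int × Char)) (st : List Int × PySem.Set Int × List String)
    (j : Int), j ∈ (l.foldl bbgStepB st).2.1 → j ∈ st.2.1 ∨ ∃ p ∈ l, j = p.1 := by
  intro l
  induction l with
  | nil => intro st j h; exact Or.inl h
  | cons p rest ih =>
    intro st j h
    simp only [List.foldl_cons] at h
    rcases ih _ _ h with h' | ⟨q, hq, rfl⟩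
    · unfold bbgStepB at h'
      split_ifs at h' with h1 h2 h3
      · exact Or.inl h'
      · exact Or.inl h'
      · rcases (PySem.Set.mem_add _ _ _).1 h' with h'' | rfl
        · exact Or.inl h''
        · exact Or.inr ⟨p, List.mem_cons_self, rfl⟩
      · exact Or.inl h'
    · exact Or.inr ⟨q, List.mem_cons_of_mem _ hq, rfl⟩

-- the drop set only grows during B's scan
lemma bbg_drop_mono : ∀ (l : List (Int × Char)) (st : List Int × PySem.Set Int × List String)
    (j : Int), j ∈ st.2.1 → j ∈ (l.foldl bbgStepB st).2.1 := by
  intro l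
  induction l with
  | nil => intro st j h; exact h
  | cons p rest ih =>
    intro st j h
    simp only [List.foldl_cons]
    apply ih
    unfold bbgStepB
    split_ifs <;> simp_all [PySem.Set.mem_add]

-- main invariant: A's fold equals B's fold, with A's corrected text the filter of the
-- processed pairs by the final drop set, provided indices are strictly increasing and
-- every index already in the drop set precedes all remaining indices
lemma bbg_loop_eq : ∀ (l : List (Int × Char)) (stack : List Int) (ctext : List Char)
    (corr : List String) (drop : PySem.Set Int),
    l.Pairwise (fun p q => p.1 < q.1) →
    (∀ j ∈ drop, ∀ p ∈ l, j < p.1) →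
    l.foldl bbgStepA (stack, ctext, corr) =
      ((l.foldl bbgStepB (stack, drop, corr)).1,
       ctext ++ (l.filter
         (fun p => ¬ PySem.Set.contains (l.foldl bbgStepB (stack, drop, corr)).2.1 p.1)).map (·.2),
       (l.foldl bbgStepB (stack, drop, corr)).2.2) := by
  intro l
  induction l with
  | nil => intro stack ctext corr drop _ _; simp
  | cons p rest ih =>
    intro stack ctext corr drop hpw hlt
    have hpw' : rest.Pairwise (fun p q => p.1 < q.1) := (List.pairwise_cons.1 hpw).2
    have hhead : ∀ q ∈ rest, p.1 < q.1 := (List.pairwise_cons.1 hpw).1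
    -- index p.1 never appears in the final drop set unless it is put there at this step
    have hnotin : ∀ (st : List Int) (dr : PySem.Set Int) (co : List String),
        (∀ j ∈ dr, j < p.1) →
        ¬ p.1 ∈ (rest.foldl bbgStepB (st, dr, co)).2.1 := by
      intro st dr co hdr hmem
      rcases bbg_drop_sub rest (st, dr, co) p.1 hmem with h | ⟨q, hq, hqe⟩
      · exact absurd (hdr _ h) (lt_irrefl _)
      · exact absurd (hqe ▸ hhead q hq) (lt_irrefl _)
    have hdr0 : ∀ j ∈ drop, j < p.1 := fun j hj => hlt j hj p List.mem_cons_self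
    simp only [List.foldl_cons, bbgStepA, bbgStepB]
    split_ifs with h1 h2 h3
    · -- '{' : push index, keep char
      rw [ih (stack ++ [p.1]) (ctext ++ [p.2]) corr drop hpw'
            (fun j hj q hq => hlt j hj q (List.mem_cons_of_mem _ hq))]
      have := hnotin (stack ++ [p.1]) drop corr hdr0
      simp [PySem.Set.contains, this, List.append_assoc]
    · -- '}' with nonempty stack : pop stack, keep char
      rw [ih stack.dropLast (ctext ++ [p.2]) corr drop hpw'
            (fun j hj q hq => hlt j hj q (List.mem_cons_of_mem _ hq))]
      have := hnotin stack.dropLast drop corr hdr0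
      simp [PySem.Set.contains, this, List.append_assoc]
    · -- '}' with empty stack : drop the char, record the index
      have hdr' : ∀ j ∈ drop.add p.1, ∀ q ∈ rest, j < q.1 := by
        intro j hj q hq
        rcases (PySem.Set.mem_add _ _ _).1 hj with hj' | rfl
        · exact lt_trans (hdr0 j hj') (hhead q hq)
        · exact hhead q hq
      rw [List.dropLast_concat,
          ih stack ctext
            (corr ++ ["Unmatched closing brace at position " ++ PySem.Int.toStr p.1])
            (drop.add p.1) hpw' hdr']
      have hin : p.1 ∈ (rest.foldl bbgStepB (stack, drop.add p.1,
          corr ++ ["Unmatched closing brace at position " ++ PySem.Int.toStr p.1])).2.1 :=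
        bbg_drop_mono rest _ p.1 ((PySem.Set.mem_add _ _ _).2 (Or.inr rfl))
      simp [PySem.Set.contains, hin]
    · -- any other char : keep it
      rw [ih stack (ctext ++ [p.2]) corr drop hpw'
            (fun j hj q hq => hlt j hj q (List.mem_cons_of_mem _ hq))]
      have := hnotin stack drop corr hdr0
      simp [PySem.Set.contains, this, List.append_assoc]

-- A's trailing loop over the leftover stack, in closed form
lemma bbg_fin_eq : ∀ (stack : List Int) (ctext : List Char) (corr : List String),
    stack.foldl (fun (q : List Char × List String) idx =>
        (q.1 ++ ['}'],
         q.2 ++ ["Missing closing brace for opening at position " ++ PySem.Int.toStr idx]))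
      (ctext, corr) =
    (ctext ++ List.replicate stack.length '}',
     corr ++ stack.map (fun idx => "Missing closing brace for opening at position " ++ PySem.Int.toStr idx)) := by
  intro stack
  induction stack with
  | nil => intro ctext corr; simp
  | cons x xs ih =>
    intro ctext corr
    simp [List.foldl_cons, ih, List.replicate_succ]

-- ===== VERDICT (by name: the statement is the Claim_ definition above) =====
theorem balance_braces_globally_spec : Claim_equal_balance_braces_globally := by
  intro text _
  show _ = _
  unfold balance_braces_globally balance_braces_globally_alt
  rw [bbg_loop_eq (PySem.List.enumerate text.toList 0) [] [] [] PySem.Set.empty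
        (PySem.List.pairwise_lt_enumerate _ _) (by intro j hj; cases hj)]
  simp only [PySem.List.pyRepeat_singleton, Int.toNat_natCast]
  split_ifs with h
  · rw [bbg_fin_eq]
    rfl
  · rw [not_ne_iff] at h
    simp only [PySem.Set.empty] at h
    simp [h]
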